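-- pv_equiv track=rewrite | github.com/yuese12333/CkCut | src/evaluate.py | get_word_spans
-- ===== SOURCE A (Python) =====
-- def get_word_spans(words: list) -> set:
--     """
--     将分词列表转化为字符区间集合。
--     例如 ["这", "是", "测试"] -> {(0, 1), (1, 2), (2, 4)}
--     """
--     spans = set()
--     offset = 0
--     for word in words:
--         length = len(word)
--         spans.add((offset, offset + length))
--         offset += length
--     return spans
-- ===== SOURCE B (Python) =====
-- def get_word_spans(words: list) -> set:
--     """
--     将分词列表转化为字符区间集合。
--     Declarative per-index formulation: the span of word i is
--     (total length of words before i, total length of words up to and including i),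
--     computed independently for each index by summing prefix slices (no running state).
--     """
--     lens = [len(w) for w in words]
--     return {(sum(lens[:i]), sum(lens[:i + 1])) for i in range(len(lens))}
-- ===== Notes on version B (the rewrite author's own statement) =====
-- stated objective: alternative
-- what changed: Replaces A's stateful running-offset loop with a stateless per-index formulation: each word's span is computed independently as the sums of its prefix slices of the length list (brute-force recomputation, O(n^2), vs A's incremental O(n) accumulator).
import Mathlib
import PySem

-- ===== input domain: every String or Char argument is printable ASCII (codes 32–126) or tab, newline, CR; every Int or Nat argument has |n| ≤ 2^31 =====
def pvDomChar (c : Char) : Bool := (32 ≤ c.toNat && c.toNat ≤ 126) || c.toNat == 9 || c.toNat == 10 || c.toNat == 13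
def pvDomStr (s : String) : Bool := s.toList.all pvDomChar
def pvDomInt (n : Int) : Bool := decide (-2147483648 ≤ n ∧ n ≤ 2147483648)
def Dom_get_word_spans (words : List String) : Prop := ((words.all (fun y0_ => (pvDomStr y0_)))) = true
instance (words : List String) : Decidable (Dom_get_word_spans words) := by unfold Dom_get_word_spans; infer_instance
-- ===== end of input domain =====

-- B replaces A's stateful running-offset loop with a stateless per-index formulation (span i from prefix-slice sums); alternative decomposition, quadratic vs linear.

-- ===== PORT A =====
-- spans = set(); offset = 0; for word in words: add (offset, offset+len(word)); offset += len(word)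
def get_word_spans (words : List String) : List (Int × Int) :=
  (words.foldl
    (fun (st : PySem.Set (Int × Int) × Int) word =>
      let length : Int := PySem.Str.len word
      (PySem.Set.add st.1 (st.2, st.2 + length), st.2 + length))
    (PySem.Set.empty, 0)).1

-- ===== PORT B =====
-- lens = [len(w) for w in words]; {(sum(lens[:i]), sum(lens[:i+1])) for i in range(len(lens))}
-- range(len(lens)) → List.range; lens[:i] for the Nat index 0 ≤ i ≤ len → List.take i (exact there)
def get_word_spans_alt (words : List String) : List (Int × Int) :=
  let lens : List Int := words.map PySem.Str.len
  PySem.Set.ofList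
    ((List.range lens.length).map (fun i => ((lens.take i).sum, (lens.take (i + 1)).sum)))

-- ===== PRECONDITION & SPEC =====
def Spec_get_word_spans (words : List String) (out : List (Int × Int)) : Prop := out = get_word_spans_alt words
instance (words : List String) (out : List (Int × Int)) : Decidable (Spec_get_word_spans words out) := by unfold Spec_get_word_spans; infer_instance

-- ===== CLAIM =====
def Claim_equal_get_word_spans : Prop := ∀ (words : List String), Dom_get_word_spans words → Spec_get_word_spans words (get_word_spans words)

-- ===== LEMMAS AND PROOFS =====

/-- The mathematical span list: spans of `ws` starting at offset `o`. -/
def pvPairs (o : Int) : List String → List (Int × Int)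
  | [] => []
  | w :: ws => (o, o + PySem.Str.len w) :: pvPairs (o + PySem.Str.len w) ws

theorem pvA_fold (ws : List String) (s : PySem.Set (Int × Int)) (o : Int) :
    (ws.foldl
      (fun (st : PySem.Set (Int × Int) × Int) word =>
        let length : Int := PySem.Str.len word
        (PySem.Set.add st.1 (st.2, st.2 + length), st.2 + length))
      (s, o)).1 = PySem.Set.update s (pvPairs o ws) := by
  induction ws generalizing s o with
  | nil => simp [pvPairs, PySem.Set.update]
  | cons w ws ih =>
      simp only [List.foldl]
      rw [ih]
      simp [pvPairs, PySem.Set.update]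

theorem pvB_map (ws : List String) (o : Int) :
    (List.range ws.length).map
        (fun i => (o + ((ws.map PySem.Str.len).take i).sum,
                   o + ((ws.map PySem.Str.len).take (i + 1)).sum))
      = pvPairs o ws := by
  induction ws generalizing o with
  | nil => simp [pvPairs]
  | cons w ws ih =>
      simp only [List.length_cons, List.range_succ_eq_map, List.map_cons, List.map_map,
        pvPairs]
      congr 1
      · simp
      · have := ih (o + PySem.Str.len w)
        rw [← this]
        apply List.map_congr_left
        intro i _
        simp [List.take_succ_cons, add_assoc]

-- ===== VERDICT =====
theorem get_word_spans_spec : Claim_equal_get_word_spans := by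
  intro words _
  show get_word_spans words = get_word_spans_alt words
  unfold get_word_spans get_word_spans_alt
  rw [pvA_fold]
  have h := pvB_map words 0
  simp only [zero_add] at h
  simp only [List.length_map, h]
  rfl
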